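-- pv_equiv track=rewrite | github.com/JakeSichley/Discord-Bot | cogs/groups.py | find_last_index_under_threshold
-- ===== SOURCE A (Python) =====
-- from typing import Optional, Dict, List, Tuple
--
-- def find_last_index_under_threshold(collection: List[str]) -> int:
--     """
--     Finds the last element (index) that would allow the collection to remain under the embed field limit (1024).
--
--     Parameters:
--         collection (List[str]): The elements to examine.
--
--     Returns:
--         (Optional[int]): The index of the last viable element, if any.
--     """
--
--     running_total = 0
--
--     for index, element in enumerate(collection):
--         # +1 for future newline
--         if running_total + len(element) + 1 <= 1024:
--             running_total += len(element) + 1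
--         else:
--             return index - 1
--
--     return len(collection)
-- ===== SOURCE B (Python) =====
-- def find_last_index_under_threshold(collection):
--     # Two-pass: build the full prefix-sum table, then scan it for the first overflow.
--     totals = []
--     t = 0
--     for e in collection:
--         t += len(e) + 1
--         totals.append(t)
--     return next((i - 1 for i, c in enumerate(totals) if c > 1024), len(collection))
-- ===== Notes on version B (the rewrite author's own statement) =====
-- stated objective: alternative
-- what changed: Replaces the fused running-total-with-early-return loop by a two-phase decomposition: first materialise the whole prefix-sum table, then a separate scan (next over enumerate) finds the first entry over 1024 and returns its index minus one, or len(collection) if none.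
import Mathlib
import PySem

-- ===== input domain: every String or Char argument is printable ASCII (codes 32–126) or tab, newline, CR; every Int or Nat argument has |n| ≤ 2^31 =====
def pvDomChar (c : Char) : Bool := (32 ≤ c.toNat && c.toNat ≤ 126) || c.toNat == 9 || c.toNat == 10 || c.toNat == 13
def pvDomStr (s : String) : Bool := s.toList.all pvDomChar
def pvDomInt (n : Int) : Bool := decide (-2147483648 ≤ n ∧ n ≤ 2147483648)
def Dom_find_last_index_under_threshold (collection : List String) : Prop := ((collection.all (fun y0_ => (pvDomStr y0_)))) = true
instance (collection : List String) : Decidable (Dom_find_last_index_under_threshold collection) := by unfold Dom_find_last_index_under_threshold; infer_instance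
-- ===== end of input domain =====

-- B restructures A's fused running-total loop into a two-phase decomposition (build the full prefix-sum table, then scan it); same cost, no behavioural change.


-- ===== PORT A =====
-- the for-loop of A: index/running_total carried as state, early return as base case
def pvGoA : List String → Int → Int → Int
  | [], index, _ => index
  | e :: rest, index, running_total =>
    if running_total + PySem.Str.len e + 1 ≤ 1024 then
      pvGoA rest (index + 1) (running_total + PySem.Str.len e + 1)
    else
      index - 1

def find_last_index_under_threshold (collection : List String) : Int :=
  pvGoA collection 0 0

-- ===== PORT B =====
-- first pass of B: build the full prefix-sum table (foldl carries (t, totals))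
def pvCumul (collection : List String) : List Int :=
  (collection.foldl (fun (acc : Int × List Int) e =>
    (acc.1 + PySem.Str.len e + 1, acc.2 ++ [acc.1 + PySem.Str.len e + 1])) (0, [])).2

-- second pass of B: the next(...) generator scan over enumerate(totals)
def pvFirstOver : List Int → Int → Option Int
  | [], _ => none
  | c :: rest, i => if c > 1024 then some (i - 1) else pvFirstOver rest (i + 1)

def find_last_index_under_threshold_alt (collection : List String) : Int :=
  (pvFirstOver (pvCumul collection) 0).getD (collection.length : Int)

-- ===== PRECONDITION & SPEC =====
def Spec_find_last_index_under_threshold (collection : List String) (out : Int) : Prop := out = find_last_index_under_threshold_alt collection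
instance (collection : List String) (out : Int) : Decidable (Spec_find_last_index_under_threshold collection out) := by unfold Spec_find_last_index_under_threshold; infer_instance

-- ===== CLAIM (what is proved, stated in full; the proofs are below) =====
def Claim_equal_find_last_index_under_threshold : Prop := ∀ (collection : List String), Dom_find_last_index_under_threshold collection → Spec_find_last_index_under_threshold collection (find_last_index_under_threshold collection)

-- ===== LEMMAS AND PROOFS =====
-- structural version of the prefix-sum table, for induction
def pvCumulAux : List String → Int → List Int
  | [], _ => []
  | e :: rest, t => (t + PySem.Str.len e + 1) :: pvCumulAux rest (t + PySem.Str.len e + 1)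

theorem pvCumul_foldl (xs : List String) (t : Int) (acc : List Int) :
    (xs.foldl (fun (acc : Int × List Int) e =>
      (acc.1 + PySem.Str.len e + 1, acc.2 ++ [acc.1 + PySem.Str.len e + 1])) (t, acc)).2
    = acc ++ pvCumulAux xs t := by
  induction xs generalizing t acc with
  | nil => simp [pvCumulAux]
  | cons e rest ih =>
    rw [List.foldl_cons]
    exact (ih _ _).trans (by simp [pvCumulAux])

theorem pvGoA_eq (xs : List String) (i t : Int) :
    pvGoA xs i t = (pvFirstOver (pvCumulAux xs t) i).getD (i + xs.length) := by
  induction xs generalizing i t with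
  | nil => simp [pvGoA, pvCumulAux, pvFirstOver]
  | cons e rest ih =>
    simp only [pvGoA, pvCumulAux, pvFirstOver]
    by_cases h : t + PySem.Str.len e + 1 ≤ 1024
    · rw [if_pos h, if_neg (by omega), ih]
      simp [Int.add_comm, Int.add_left_comm]
    · rw [if_neg h, if_pos (by omega)]
      simp

-- ===== VERDICT (by name: the statement is the Claim_ definition above) =====
theorem find_last_index_under_threshold_spec : Claim_equal_find_last_index_under_threshold := by
  intro collection _
  show _ = _
  rw [find_last_index_under_threshold, find_last_index_under_threshold_alt, pvCumul,
    pvCumul_foldl, pvGoA_eq]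
  simp
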